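-- pv_equiv track=rewrite | github.com/Cr-Mo-Marco-3000/Algorithm | SWEA/1859_백만장자프로젝트/s1.py | future
-- ===== SOURCE A (Python) =====
-- def future(my_list, N):
--     '''
--     my_list: 날짜별 가격의 리스트
--     N: 가격의 개수
--     '''
--     sell_list = [N-1]
--     max_index = N-1                         # 오른쪽부터 접근하며, 이전 숫자보다 크면 거기서 팔아야지 손해를 보지 않는다.
--     for i in range(N - 1, -1, -1):          # 예를 들어, 1 2 5 2 3 이라면, 3과 5에서 팔아야 한다.
--         if my_list[i] > my_list[max_index]:
--             sell_list.append(i)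
--             max_index = i
--     sell_list.sort()
--
--     # 판매하는 날들을 정렬시켜줬다.
--     sell_len = len(sell_list)
--
--     j = 0                       # 전체 인덱스
--     k = 0                       # 판매하는 날의 인덱스, in이나 for 문을 통해 순환하며 비교하기보다 연산을 줄여주기 위해,1씩 증가시켜준다.
--     cost = 0                    # 팔기 전 산 물품들의 비용
--     buy = 0                     # 산 날들 횟수
--     revenue = 0                 # 당기순이익
--     while j < N:
--         if j == sell_list[k]:                   # 만약 파는 날 리스트의 목록중 k-1 번째와 전체 인덱스 j가 일치한다면
--             revenue += buy * my_list[j] - cost  # 현재 가격 * 구입한 횟수 - 총비용을 해서 당기순이익에 더해주고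
--             buy = 0                             # 재고를 털었으니 buy는 0
--             cost = 0                            # 지금까지의 재고비용을 0 해준 후
--             k += 1                              # 파는 날들 리스트의 인덱스를 다음으로 옮겨주고
--             j += 1                              # 다음 날로 돌려준다.
--         else:                                   # 살 때와 팔 때 케이스를 나누지 않고 해결하려다, 나누는 게 편하다는 걸 깨달았다. 주요 행동이 다르므로, 나누자.
--             buy += 1                            # 하루에 하나만 살 수 있으므로 재고 + 1
--             cost += my_list[j]                  # 구매 비용은 매일마다 달라지므로 += 해줘야 한다.
--             j += 1                              # 하루 일과를 끝냈으면 다음 날로 옮겨준다.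
--     return revenue
-- ===== SOURCE B (Python) =====
-- def future(my_list, N):
--     revenue = 0
--     mx = None
--     for i in range(N - 1, -1, -1):
--         p = my_list[i]
--         if mx is None or p > mx:
--             mx = p
--         revenue += mx - p
--     return revenue
-- ===== Notes on version B (the rewrite author's own statement) =====
-- stated objective: simpler
-- what changed: Replaced A's three-phase pipeline (collect sell days right-to-left, sort them, then replay the days left-to-right with a buy/cost accumulator against the sorted sell list) by a single right-to-left pass that keeps the running suffix maximum and adds (max - price) for each day.
import Mathlib
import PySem

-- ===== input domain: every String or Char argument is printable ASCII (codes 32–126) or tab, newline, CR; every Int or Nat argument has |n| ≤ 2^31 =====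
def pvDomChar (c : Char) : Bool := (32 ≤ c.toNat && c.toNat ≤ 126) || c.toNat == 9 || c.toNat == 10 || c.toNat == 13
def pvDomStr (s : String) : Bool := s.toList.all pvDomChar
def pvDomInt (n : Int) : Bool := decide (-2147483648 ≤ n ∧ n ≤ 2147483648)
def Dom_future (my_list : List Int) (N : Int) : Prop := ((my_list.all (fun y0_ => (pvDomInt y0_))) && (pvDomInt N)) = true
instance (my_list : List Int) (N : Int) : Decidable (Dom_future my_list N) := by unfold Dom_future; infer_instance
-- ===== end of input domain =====

-- B replaces A's collect-sell-days / sort / replay-with-buy-and-cost pipeline by one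
-- right-to-left pass adding (running suffix maximum - price) per day: simpler, one loop.

-- ===== PORT A =====
-- the 'while j < N' loop of A; under Pre_ every index it reads is in range, so pyGetD's default is never read
def futureWhile (my_list : List Int) (N : Int) (sell : List Int)
    (j k cost buy revenue : Int) : Int :=
  if j < N then
    if j = PySem.List.pyGetD sell k 0 then
      futureWhile my_list N sell (j+1) (k+1) 0 0
        (revenue + (buy * PySem.List.pyGetD my_list j 0 - cost))
    else
      futureWhile my_list N sell (j+1) k (cost + PySem.List.pyGetD my_list j 0) (buy+1) revenue
  else revenue
termination_by (N - j).toNat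
decreasing_by all_goals omega


def future (my_list : List Int) (N : Int) : Int :=
  let st := (PySem.List.pyRange (N-1) (-1) (-1)).foldl
    (fun (s : List Int × Int) i =>
      if PySem.List.pyGetD my_list i 0 > PySem.List.pyGetD my_list s.2 0
      then (s.1 ++ [i], i) else s)
    ([N-1], N-1)
  let sell := PySem.List.sorted st.1 (fun x => x) false
  futureWhile my_list N sell 0 0 0 0 0

-- ===== PORT B =====
def future_alt (my_list : List Int) (N : Int) : Int :=
  ((PySem.List.pyRange (N-1) (-1) (-1)).foldl
    (fun (s : Option Int × Int) i =>
      let p := PySem.List.pyGetD my_list i 0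
      let mx := match s.1 with
        | none => p
        | some m => if p > m then p else m
      (some mx, s.2 + (mx - p)))
    (none, 0)).2

-- ===== PRECONDITION & SPEC =====
-- Pre_ excludes exactly the inputs on which A raises IndexError: N > len(my_list)
def Pre_future (my_list : List Int) (N : Int) : Prop := N ≤ (my_list.length : Int)
instance (my_list : List Int) (N : Int) : Decidable (Pre_future my_list N) := by
  unfold Pre_future; infer_instance

def pvWitness_future : List Int × Int := ([5, 1, 2, 4, 3], 5)

def Spec_future (my_list : List Int) (N : Int) (out : Int) : Prop := out = future_alt my_list N
instance (my_list : List Int) (N : Int) (out : Int) : Decidable (Spec_future my_list N out) := by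
  unfold Spec_future; infer_instance

-- ===== CLAIM (what is proved, stated in full; the proofs are below) =====
def Claim_equal_future : Prop := ∀ (my_list : List Int) (N : Int), Dom_future my_list N → Pre_future my_list N → Spec_future my_list N (future my_list N)

-- ===== LEMMAS AND PROOFS =====

def pvG (my : List Int) (j : Nat) : Int := PySem.List.pyGetD my ((j : Nat) : Int) 0

def pvSmax (my : List Int) (n j : Nat) : Int :=
  if j + 1 < n then max (pvG my j) (pvSmax my n (j+1)) else pvG my j
termination_by n - j

def pvTot (my : List Int) (n j : Nat) : Int :=
  if j < n then (pvSmax my n j - pvG my j) + pvTot my n (j+1) else 0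
termination_by n - j

def pvAsc (my : List Int) (n j : Nat) : List Int :=
  if j < n then
    (if j = n - 1 ∨ pvG my j > pvSmax my n (j+1) then ((j : Nat) : Int) :: pvAsc my n (j+1)
     else pvAsc my n (j+1))
  else []
termination_by n - j

theorem pvSmax_sell (my : List Int) (n j : Nat) (hj : j < n)
    (hs : j = n - 1 ∨ pvG my j > pvSmax my n (j+1)) : pvSmax my n j = pvG my j := by
  rw [pvSmax]
  rcases hs with h | h
  · rw [if_neg (by omega)]
  · by_cases hlt : j + 1 < n
    · rw [if_pos hlt]; exact max_eq_left h.le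
    · rw [if_neg hlt]

theorem pvSmax_nonsell (my : List Int) (n j : Nat) (_hj : j < n) (h1 : j ≠ n - 1)
    (h2 : ¬ pvG my j > pvSmax my n (j+1)) : pvSmax my n j = pvSmax my n (j+1) := by
  rw [pvSmax, if_pos (by omega)]
  exact max_eq_right (not_lt.mp h2)

theorem pvAsc_lb (my : List Int) (n : Nat) : ∀ j, ∀ x ∈ pvAsc my n j, ((j : Nat) : Int) ≤ x := by
  have H : ∀ d j, n - j ≤ d → ∀ x ∈ pvAsc my n j, ((j : Nat) : Int) ≤ x := by
    intro d
    induction d with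
    | zero =>
      intro j hj x hx
      rw [pvAsc, if_neg (by omega)] at hx
      simp at hx
    | succ d ih =>
      intro j hj x hx
      rw [pvAsc] at hx
      by_cases h1 : j < n
      · rw [if_pos h1] at hx
        split at hx
        · rcases List.mem_cons.mp hx with h | h
          · omega
          · have := ih (j+1) (by omega) x h; push_cast at this ⊢; omega
        · have := ih (j+1) (by omega) x hx; push_cast at this ⊢; omega
      · rw [if_neg h1] at hx; simp at hx
  intro j x hx
  exact H (n - j) j le_rfl x hx

theorem pvAsc_pw (my : List Int) (n : Nat) : ∀ j, (pvAsc my n j).Pairwise (· < ·) := by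
  have H : ∀ d j, n - j ≤ d → (pvAsc my n j).Pairwise (· < ·) := by
    intro d
    induction d with
    | zero => intro j hj; rw [pvAsc, if_neg (by omega)]; exact List.Pairwise.nil
    | succ d ih =>
      intro j hj
      rw [pvAsc]
      by_cases h1 : j < n
      · rw [if_pos h1]
        split
        · refine List.Pairwise.cons ?_ (ih (j+1) (by omega))
          intro x hx
          have := pvAsc_lb my n (j+1) x hx
          push_cast at this ⊢
          omega
        · exact ih (j+1) (by omega)
      · rw [if_neg h1]; exact List.Pairwise.nil
  intro j
  exact H (n - j) j le_rfl

theorem pvAsc_ne (my : List Int) (n : Nat) : ∀ j, j < n → pvAsc my n j ≠ [] := by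
  have H : ∀ d j, n - j ≤ d → j < n → pvAsc my n j ≠ [] := by
    intro d
    induction d with
    | zero => intro j hj hjn; omega
    | succ d ih =>
      intro j hj hjn
      rw [pvAsc, if_pos hjn]
      by_cases hs : j = n - 1 ∨ pvG my j > pvSmax my n (j+1)
      · rw [if_pos hs]; simp
      · rw [if_neg hs]
        have hne : j ≠ n - 1 := fun h => hs (Or.inl h)
        exact ih (j+1) (by omega) (by omega)
  intro j hj
  exact H (n - j) j le_rfl hj

theorem pvGetD_drop (sell : List Int) (k : Int) (hk : 0 ≤ k) :
    PySem.List.pyGetD sell k 0 = PySem.List.pyGetD (sell.drop k.toNat) 0 0 := by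
  have h : k = ((k.toNat : Nat) : Int) := (Int.toNat_of_nonneg hk).symm
  rw [h, PySem.List.pyGetD_natCast, PySem.List.pyGetD_zero]
  have h2 : ((k.toNat : Int)).toNat = k.toNat := by omega
  simp [List.getD_eq_getElem?_getD, List.getElem?_drop]
  rw [max_eq_left hk]

theorem futureWhile_drop (my : List Int) (N : Int) :
    ∀ (d : Nat) (j : Int), (N - j).toNat ≤ d → ∀ (k : Int), 0 ≤ k → ∀ (sell : List Int) (c b r : Int),
      futureWhile my N sell j k c b r = futureWhile my N (sell.drop k.toNat) j 0 c b r := by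
  intro d
  induction d with
  | zero =>
    intro j hj k hk sell c b r
    have h1 : ¬ j < N := by omega
    conv_lhs => rw [futureWhile]
    conv_rhs => rw [futureWhile]
    rw [if_neg h1, if_neg h1]
  | succ d ih =>
    intro j hj k hk sell c b r
    by_cases hjN : j < N
    · conv_lhs => rw [futureWhile]
      conv_rhs => rw [futureWhile]
      rw [if_pos hjN, if_pos hjN, ← pvGetD_drop sell k hk]
      simp only [zero_add]
      by_cases he : j = PySem.List.pyGetD sell k 0
      · rw [if_pos he, if_pos he]
        rw [ih (j+1) (by omega) (k+1) (by omega) sell 0 0 _]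
        rw [ih (j+1) (by omega) 1 (by omega) (sell.drop k.toNat) 0 0 _]
        have hd : (sell.drop k.toNat).drop ((1:Int).toNat) = sell.drop ((k+1).toNat) := by
          rw [List.drop_drop]
          congr 1
          omega
        rw [hd]
      · rw [if_neg he, if_neg he]
        exact ih (j+1) (by omega) k hk sell _ _ _
    · conv_lhs => rw [futureWhile]
      conv_rhs => rw [futureWhile]
      rw [if_neg hjN, if_neg hjN]

theorem pvWL (my : List Int) (n : Nat) (N : Int) (hNn : N = (n : Int)) :
    ∀ (d j : Nat), n - j ≤ d → j ≤ n → ∀ (c b r : Int),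
      futureWhile my N (pvAsc my n j) ((j : Nat) : Int) 0 c b r
        = r + pvTot my n j + (if j < n then b * pvSmax my n j - c else 0) := by
  intro d
  induction d with
  | zero =>
    intro j hd hj c b r
    have hjn : j = n := by omega
    subst hjn
    rw [pvAsc, if_neg (by omega), pvTot, if_neg (by omega)]
    conv_lhs => rw [futureWhile]
    rw [if_neg (by omega), if_neg (by omega)]
    ring
  | succ d ih =>
    intro j hd hj c b r
    by_cases hjn : j < n
    · by_cases hs : j = n - 1 ∨ pvG my j > pvSmax my n (j+1)
      · -- sell day
        have hasc : pvAsc my n j = ((j : Nat) : Int) :: pvAsc my n (j+1) := by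
          rw [pvAsc, if_pos hjn, if_pos hs]
        rw [hasc]
        conv_lhs => rw [futureWhile]
        rw [if_pos (by omega), PySem.List.pyGetD_zero_cons, if_pos rfl]
        simp only [zero_add]
        rw [futureWhile_drop my N (N - ((j:Int)+1)).toNat ((j:Int)+1) le_rfl 1 (by omega) _ 0 0 _]
        have hd1 : (((j : Nat) : Int) :: pvAsc my n (j+1)).drop ((1:Int).toNat) = pvAsc my n (j+1) := by
          norm_num
        rw [hd1]
        have hc : ((j : Nat) : Int) + 1 = (((j+1 : Nat)) : Int) := by push_cast; ring
        rw [hc, ih (j+1) (by omega) (by omega) 0 0 _]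
        have h1 : pvSmax my n j = pvG my j := pvSmax_sell my n j hjn hs
        have hg : PySem.List.pyGetD my ((j : Nat) : Int) 0 = pvG my j := rfl
        rw [hg]
        conv_rhs => rw [pvTot, if_pos hjn]
        rw [if_pos hjn, h1]
        split_ifs <;> ring
      · -- buy day
        have hne : j ≠ n - 1 := fun h => hs (Or.inl h)
        have hj1 : j + 1 < n := by omega
        have hasc : pvAsc my n j = pvAsc my n (j+1) := by rw [pvAsc, if_pos hjn, if_neg hs]
        conv_lhs => rw [futureWhile]
        rw [if_pos (by omega)]
        obtain ⟨a, t, hat⟩ : ∃ a t, pvAsc my n (j+1) = a :: t := by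
          cases h : pvAsc my n (j+1) with
          | nil => exact absurd h (pvAsc_ne my n (j+1) hj1)
          | cons a t => exact ⟨a, t, rfl⟩
        have ha : (((j+1 : Nat)) : Int) ≤ a :=
          pvAsc_lb my n (j+1) a (by rw [hat]; exact List.mem_cons_self)
        have hcond : ¬ ((j : Nat) : Int) = PySem.List.pyGetD (pvAsc my n j) 0 0 := by
          rw [hasc, hat, PySem.List.pyGetD_zero_cons]
          push_cast at ha ⊢
          omega
        rw [if_neg hcond]
        have hc : ((j : Nat) : Int) + 1 = (((j+1 : Nat)) : Int) := by push_cast; ring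
        rw [hasc, hc, ih (j+1) (by omega) (by omega) _ _ _]
        have h2 : pvSmax my n j = pvSmax my n (j+1) := by
          exact pvSmax_nonsell my n j hjn hne (fun h => hs (Or.inr h))
        have hg : PySem.List.pyGetD my ((j : Nat) : Int) 0 = pvG my j := rfl
        rw [hg]
        conv_rhs => rw [pvTot, if_pos hjn]
        rw [if_pos hj1, if_pos hjn, h2]
        ring
    · -- j = n
      have hjn' : j = n := by omega
      subst hjn'
      rw [pvAsc, if_neg (by omega), pvTot, if_neg (by omega)]
      conv_lhs => rw [futureWhile]
      rw [if_neg (by omega), if_neg (by omega)]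
      ring

def pvDsl (my : List Int) (n : Nat) : Nat → List Int
  | 0 => if pvG my 0 > pvSmax my n 1 then [(0 : Int)] else []
  | j+1 => (if pvG my (j+1) > pvSmax my n (j+2) then [(((j+1 : Nat)) : Int)] else []) ++ pvDsl my n j

theorem pvA1 (my : List Int) (n : Nat) :
    ∀ (j : Nat), j + 2 ≤ n → ∀ (acc : List Int) (m : Int),
      PySem.List.pyGetD my m 0 = pvSmax my n (j+1) →
      ∃ m', (PySem.List.pyRange ((j : Nat) : Int) (-1) (-1)).foldl
        (fun (s : List Int × Int) i =>
          if PySem.List.pyGetD my i 0 > PySem.List.pyGetD my s.2 0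
          then (s.1 ++ [i], i) else s) (acc, m) = (acc ++ pvDsl my n j, m') := by
  intro j
  induction j with
  | zero =>
    intro h2 acc m hm
    rw [PySem.List.pyRange_neg_one_cons (by omega), show ((0:Nat):Int) - 1 = -1 by norm_num,
        PySem.List.pyRange_neg_one_eq_nil (by omega)]
    simp only [List.foldl_cons, List.foldl_nil, hm]
    have hg : PySem.List.pyGetD my ((0:Nat):Int) 0 = pvG my 0 := rfl
    rw [hg]
    unfold pvDsl
    by_cases hc : pvG my 0 > pvSmax my n 1
    · rw [if_pos hc, if_pos hc]
      exact ⟨((0:Nat):Int), rfl⟩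
    · rw [if_neg hc, if_neg hc]
      exact ⟨m, by simp⟩
  | succ j ihj =>
    intro h2 acc m hm
    rw [PySem.List.pyRange_neg_one_cons (by push_cast; omega),
        show (((j+1:Nat)):Int) - 1 = ((j:Nat):Int) by push_cast; ring]
    simp only [List.foldl_cons, hm]
    have hg : PySem.List.pyGetD my (((j+1:Nat)):Int) 0 = pvG my (j+1) := rfl
    rw [hg]
    by_cases hc : pvG my (j+1) > pvSmax my n (j+2)
    · rw [if_pos hc]
      have hm' : PySem.List.pyGetD my (((j+1:Nat)):Int) 0 = pvSmax my n (j+1) := by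
        rw [hg, (pvSmax_sell my n (j+1) (by omega) (Or.inr hc))]
      obtain ⟨m', hm'⟩ := ihj (by omega) (acc ++ [(((j+1:Nat)):Int)]) (((j+1:Nat)):Int) hm'
      refine ⟨m', ?_⟩
      rw [hm']
      simp only [pvDsl]
      rw [if_pos hc]
      simp [List.append_assoc]
    · rw [if_neg hc]
      have hm' : PySem.List.pyGetD my m 0 = pvSmax my n (j+1) := by
        rw [hm, (pvSmax_nonsell my n (j+1) (by omega) (by omega) hc)]
      obtain ⟨m', hm'⟩ := ihj (by omega) acc m hm'
      refine ⟨m', ?_⟩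
      rw [hm']
      simp only [pvDsl]
      rw [if_neg hc]
      simp

theorem pvAscRev (my : List Int) (n : Nat) :
    ∀ (j : Nat), j + 2 ≤ n → (pvDsl my n j).reverse ++ pvAsc my n (j+1) = pvAsc my n 0 := by
  intro j
  induction j with
  | zero =>
    intro h2
    conv_rhs => rw [pvAsc, if_pos (by omega)]
    unfold pvDsl
    by_cases hc : pvG my 0 > pvSmax my n 1
    · rw [if_pos hc, if_pos (Or.inr hc)]
      simp
    · rw [if_neg hc, if_neg (by push_neg; exact ⟨by omega, not_lt.mp hc⟩)]
      simp
  | succ j ihj =>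
    intro h2
    simp only [pvDsl]
    by_cases hc : pvG my (j+1) > pvSmax my n (j+2)
    · rw [if_pos hc]
      have ha : pvAsc my n (j+1) = (((j+1:Nat)):Int) :: pvAsc my n (j+2) := by
        rw [pvAsc, if_pos (by omega), if_pos (Or.inr hc)]
      rw [← ihj (by omega), ha]
      simp
    · rw [if_neg hc]
      have ha : pvAsc my n (j+1) = pvAsc my n (j+2) := by
        rw [pvAsc, if_pos (by omega), if_neg (by push_neg; exact ⟨by omega, not_lt.mp hc⟩)]
      rw [← ihj (by omega), ha]
      simp

theorem pvB1 (my : List Int) (n : Nat) :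
    ∀ (j : Nat), j + 2 ≤ n →
      (PySem.List.pyRange ((j : Nat) : Int) (-1) (-1)).foldl
        (fun (s : Option Int × Int) i =>
          let p := PySem.List.pyGetD my i 0
          let mx := match s.1 with
            | none => p
            | some m => if p > m then p else m
          (some mx, s.2 + (mx - p)))
        (some (pvSmax my n (j+1)), pvTot my n (j+1))
      = (some (pvSmax my n 0), pvTot my n 0) := by
  intro j
  induction j with
  | zero =>
    intro h2
    rw [PySem.List.pyRange_neg_one_cons (by omega), show ((0:Nat):Int) - 1 = -1 by norm_num,
        PySem.List.pyRange_neg_one_eq_nil (by omega)]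
    simp only [List.foldl_cons, List.foldl_nil]
    have hg : PySem.List.pyGetD my ((0:Nat):Int) 0 = pvG my 0 := rfl
    rw [hg]
    have hmx : (if pvG my 0 > pvSmax my n 1 then pvG my 0 else pvSmax my n 1) = pvSmax my n 0 := by
      have e : pvSmax my n 0 = max (pvG my 0) (pvSmax my n 1) := by
        rw [pvSmax, if_pos (by omega)]
      rw [e]
      split_ifs with h
      · exact (max_eq_left h.le).symm
      · exact (max_eq_right (not_lt.mp h)).symm
    rw [hmx]
    have hrev : pvTot my n 1 + (pvSmax my n 0 - pvG my 0) = pvTot my n 0 := by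
      conv_rhs => rw [pvTot, if_pos (by omega)]
      ring
    rw [hrev]
  | succ j ihj =>
    intro h2
    rw [PySem.List.pyRange_neg_one_cons (by push_cast; omega),
        show (((j+1:Nat)):Int) - 1 = ((j:Nat):Int) by push_cast; ring]
    simp only [List.foldl_cons]
    have hg : PySem.List.pyGetD my (((j+1:Nat)):Int) 0 = pvG my (j+1) := rfl
    rw [hg]
    have hmx : (if pvG my (j+1) > pvSmax my n (j+2) then pvG my (j+1) else pvSmax my n (j+2))
        = pvSmax my n (j+1) := by
      have e : pvSmax my n (j+1) = max (pvG my (j+1)) (pvSmax my n (j+2)) := by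
        rw [pvSmax, if_pos (by omega)]
      rw [e]
      split_ifs with h
      · exact (max_eq_left h.le).symm
      · exact (max_eq_right (not_lt.mp h)).symm
    rw [hmx]
    have hrev : pvTot my n (j+2) + (pvSmax my n (j+1) - pvG my (j+1)) = pvTot my n (j+1) := by
      conv_rhs => rw [pvTot, if_pos (by omega)]
      ring
    rw [hrev]
    exact ihj (by omega)

-- ===== VERDICT (by name: the statement is the Claim_ definition above) =====

theorem future_spec : Claim_equal_future := by
  unfold Claim_equal_future Spec_future
  intro my N _hD _hP
  by_cases hN : 0 < N
  · obtain ⟨n, hNn, hn1⟩ : ∃ n : Nat, N = (n : Int) ∧ 1 ≤ n := ⟨N.toNat, by omega, by omega⟩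
    by_cases h2 : 2 ≤ n
    · -- general case n ≥ 2
      simp only [future, future_alt]
      have hcons : PySem.List.pyRange (N-1) (-1) (-1)
          = (N-1) :: PySem.List.pyRange (N-2) (-1) (-1) := by
        rw [PySem.List.pyRange_neg_one_cons (by omega), show N-1-1 = N-2 by ring]
      rw [hcons]
      simp only [List.foldl_cons]
      rw [if_neg (lt_irrefl _)]
      have hc2 : (((n-2:Nat)):Int) = N - 2 := by omega
      have hsm : PySem.List.pyGetD my (N-1) 0 = pvSmax my n ((n-2)+1) := by
        rw [show (n-2)+1 = n-1 by omega, pvSmax, if_neg (by omega)]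
        show _ = PySem.List.pyGetD my ((((n-1):Nat)):Int) 0
        congr 1
        omega
      obtain ⟨m', hm'⟩ := pvA1 my n (n-2) (by omega) [N-1] (N-1) hsm
      rw [hc2] at hm'
      rw [hm']
      dsimp only
      have hasc1 : pvAsc my n (n-1) = [N-1] := by
        rw [pvAsc, if_pos (by omega), if_pos (Or.inl rfl), pvAsc, if_neg (by omega)]
        congr 1
        omega
      have hasc0 : pvAsc my n 0 = (pvDsl my n (n-2)).reverse ++ [N-1] := by
        rw [← pvAscRev my n (n-2) (by omega), show (n-2)+1 = n-1 by omega, hasc1]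
      have hsorted : PySem.List.sorted ([N-1] ++ pvDsl my n (n-2)) (fun x => x) false
          = pvAsc my n 0 := by
        refine PySem.List.sorted_eq_of_perm_of_pairwise_lt _ _ _ ?_ ?_
        · rw [hasc0]
          exact (List.perm_append_comm).trans (List.Perm.append_left [N-1] (List.reverse_perm _))
        · exact pvAsc_pw my n 0
      rw [hsorted]
      have hW := pvWL my n N hNn n 0 (by omega) (by omega) 0 0 0
      rw [show (((0:Nat)):Int) = (0:Int) by norm_num] at hW
      rw [hW, if_pos (by omega)]
      -- B side
      have hB0 : ((some (PySem.List.pyGetD my (N-1) 0),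
            (0:Int) + (PySem.List.pyGetD my (N-1) 0 - PySem.List.pyGetD my (N-1) 0))
            : Option Int × Int)
          = (some (pvSmax my n ((n-2)+1)), pvTot my n ((n-2)+1)) := by
        rw [Prod.mk.injEq]
        refine ⟨by rw [hsm], ?_⟩
        rw [show (n-2)+1 = n-1 by omega, pvTot, if_pos (by omega), pvTot, if_neg (by omega),
            pvSmax, if_neg (by omega)]
        have hg : pvG my (n-1) = PySem.List.pyGetD my (N-1) 0 := by
          show PySem.List.pyGetD my ((((n-1):Nat)):Int) 0 = _
          congr 1
          omega
        rw [hg]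
        ring
      rw [hB0, ← hc2, pvB1 my n (n-2) (by omega)]
      ring
    · -- n = 1
      have hN1 : N = 1 := by omega
      subst hN1
      simp only [future, future_alt, show (1:Int)-1 = 0 from by norm_num]
      have hr : PySem.List.pyRange (0:Int) (-1) (-1) = [0] := by
        rw [PySem.List.pyRange_neg_one_cons (by norm_num),
            show (0:Int)-1 = -1 by norm_num, PySem.List.pyRange_neg_one_eq_nil (by norm_num)]
      rw [hr]
      simp only [List.foldl_cons, List.foldl_nil]
      rw [if_neg (lt_irrefl _)]
      have hs1 : PySem.List.sorted [(0:Int)] (fun x => x) false = [(0:Int)] :=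
        PySem.List.sorted_eq_of_perm_of_pairwise_lt _ _ _ (List.Perm.refl _) (List.pairwise_singleton _ _)
      rw [hs1]
      conv_lhs => rw [futureWhile]
      rw [if_pos (by norm_num), PySem.List.pyGetD_zero_cons, if_pos rfl]
      conv_lhs => rw [futureWhile]
      rw [if_neg (by norm_num)]
      ring
  · -- N ≤ 0: both loops are empty
    simp only [future, future_alt]
    rw [PySem.List.pyRange_neg_one_eq_nil (by omega)]
    simp only [List.foldl_nil]
    have hs1 : PySem.List.sorted [N-1] (fun x => x) false = [N-1] :=
      PySem.List.sorted_eq_of_perm_of_pairwise_lt _ _ _ (List.Perm.refl _) (List.pairwise_singleton _ _)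
    rw [hs1]
    conv_lhs => rw [futureWhile]
    rw [if_neg (by omega)]
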